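-- pv_equiv track=rewrite | github.com/CSB5/INC-Seq | utils/buildConsensus.py | segment_filter_longest_strech
-- ===== SOURCE A (Python) =====
-- def segment_filter_longest_strech(coordinates_filtered):
--     candidate = []
--     candidate_cur = []
--     for cor in coordinates_filtered:
--         if cor == "*" or cor == "#": ## segment boundary:
--             if len(candidate_cur) > len(candidate):
--                 ## found a strech with more segments
--                 candidate = candidate_cur
--             candidate_cur = []
--         else:
--             candidate_cur.append(cor)
--     return candidate
-- ===== SOURCE B (Python) =====
-- def segment_filter_longest_strech(coordinates_filtered):
--     # Phase 1: record each boundary-terminated segment as a slice between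
--     # boundary indices (the trailing unterminated run is never recorded,
--     # matching the original).
--     segments = []
--     start = 0
--     for i, cor in enumerate(coordinates_filtered):
--         if cor == "*" or cor == "#":
--             segments.append(coordinates_filtered[start:i])
--             start = i + 1
--     # Phase 2: pick the first longest segment by a right-to-left scan.
--     best = []
--     for seg in reversed(segments):
--         if len(seg) >= len(best):
--             best = seg
--     return best
-- ===== Notes on version B (the rewrite author's own statement) =====
-- stated objective: alternative
-- what changed: Replaced the fused running-max loop that copies elements into a growing current-run list by an index-based decomposition: one enumerate pass records each boundary-terminated segment as a slice between boundary indices, then a right-to-left scan with >= picks the first longest segment.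
import Mathlib
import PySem

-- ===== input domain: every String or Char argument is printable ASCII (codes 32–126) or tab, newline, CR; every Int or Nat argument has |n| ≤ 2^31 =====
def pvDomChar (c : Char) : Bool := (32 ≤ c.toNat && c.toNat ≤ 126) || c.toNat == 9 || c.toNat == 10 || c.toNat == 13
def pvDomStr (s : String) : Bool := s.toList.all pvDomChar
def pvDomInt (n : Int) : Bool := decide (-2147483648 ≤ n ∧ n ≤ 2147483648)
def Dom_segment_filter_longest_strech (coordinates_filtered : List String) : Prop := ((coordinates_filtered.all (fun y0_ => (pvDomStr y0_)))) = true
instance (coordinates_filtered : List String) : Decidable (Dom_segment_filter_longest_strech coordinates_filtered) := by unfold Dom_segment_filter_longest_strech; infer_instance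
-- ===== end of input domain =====

-- B replaces the fused running-max loop by an index-based decomposition: record each
-- boundary-terminated segment as a slice between boundary indices, then a right-to-left
-- scan picks the first longest segment; same O(n) cost, different structure.

-- ===== PORT A =====
def segment_filter_longest_strech (coordinates_filtered : List String) : List String :=
  (coordinates_filtered.foldl
    (fun (st : List String × List String) cor =>
      if cor = "*" ∨ cor = "#" then
        (if st.2.length > st.1.length then st.2 else st.1, [])
      else
        (st.1, st.2 ++ [cor]))
    ([], [])).1

-- ===== PORT B =====
-- phase 1 of Source B: segments as slices of the input between boundary indices
def pvSegSlices (coordinates_filtered : List String) : List (List String) :=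
  ((PySem.List.enumerate coordinates_filtered 0).foldl
    (fun (st : List (List String) × Int) p =>
      if p.2 = "*" ∨ p.2 = "#" then
        (st.1 ++ [PySem.List.slice coordinates_filtered (some st.2) (some p.1)], p.1 + 1)
      else st)
    ([], 0)).1

def segment_filter_longest_strech_alt (coordinates_filtered : List String) : List String :=
  -- phase 2 of Source B: right-to-left scan, ≥ keeps the earlier of equally long segments
  (pvSegSlices coordinates_filtered).reverse.foldl
    (fun best seg => if seg.length ≥ best.length then seg else best) []

-- ===== PRECONDITION & SPEC =====
def Spec_segment_filter_longest_strech (coordinates_filtered : List String) (out : List String) : Prop := out = segment_filter_longest_strech_alt coordinates_filtered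
instance (coordinates_filtered : List String) (out : List String) : Decidable (Spec_segment_filter_longest_strech coordinates_filtered out) := by unfold Spec_segment_filter_longest_strech; infer_instance

-- ===== CLAIM (what is proved, stated in full; the proofs are below) =====
def Claim_equal_segment_filter_longest_strech : Prop := ∀ (coordinates_filtered : List String), Dom_segment_filter_longest_strech coordinates_filtered → Spec_segment_filter_longest_strech coordinates_filtered (segment_filter_longest_strech coordinates_filtered)

-- ===== LEMMAS AND PROOFS =====

-- reference segmentation: boundary-terminated runs, trailing run dropped
def pvSegRec : List String → List String → List (List String)
  | [], _ => []
  | c :: t, cur =>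
    if c = "*" ∨ c = "#" then cur :: pvSegRec t []
    else pvSegRec t (cur ++ [c])

-- A's running-max step
def pvMaxA (cand s : List String) : List String :=
  if s.length > cand.length then s else cand

-- first longest segment, computed back to front (B's phase 2 as a foldr)
def pvBestR : List (List String) → List String
  | [] => []
  | s :: t => if s.length ≥ (pvBestR t).length then s else pvBestR t

-- A's loop equals running max over the reference segments
theorem pvA_eq (xs : List String) (c cur : List String) :
    (xs.foldl
      (fun (st : List String × List String) cor =>
        if cor = "*" ∨ cor = "#" then
          (if st.2.length > st.1.length then st.2 else st.1, [])
        else (st.1, st.2 ++ [cor])) (c, cur)).1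
      = (pvSegRec xs cur).foldl pvMaxA c := by
  induction xs generalizing c cur with
  | nil => rfl
  | cons x t ih =>
    by_cases h : x = "*" ∨ x = "#"
    · simp only [List.foldl_cons, pvSegRec, h, if_pos]
      exact ih _ _
    · simp only [List.foldl_cons, pvSegRec, h, if_neg, not_false_iff]
      exact ih _ _

-- B's slice-based phase 1 equals the reference segmentation (generalized invariant)
theorem pvB_go (ys : List String) (t : List String) (j j0 : Nat) (segs : List (List String))
    (hle : j0 ≤ j) (hdrop : ys.drop j = t) :
    ((PySem.List.enumerate t (j : Int)).foldl
      (fun (st : List (List String) × Int) p =>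
        if p.2 = "*" ∨ p.2 = "#" then
          (st.1 ++ [PySem.List.slice ys (some st.2) (some p.1)], p.1 + 1)
        else st)
      (segs, (j0 : Int))).1
      = segs ++ pvSegRec t ((ys.drop j0).take (j - j0)) := by
  induction t generalizing j j0 segs with
  | nil => simp [PySem.List.enumerate, pvSegRec]
  | cons c t ih =>
    have hget : ys[j]? = some c := by
      have : (ys.drop j)[0]? = some c := by rw [hdrop]; rfl
      simpa using this
    have hdrop' : ys.drop (j + 1) = t := by
      have : (ys.drop j).tail = ys.drop (j + 1) := List.tail_drop
      rw [hdrop] at this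
      exact this.symm
    rw [PySem.List.enumerate_cons]
    by_cases h : c = "*" ∨ c = "#"
    · simp only [List.foldl_cons, h, if_pos]
      have hc : ((j : Int) + 1) = ((j + 1 : Nat) : Int) := by push_cast; ring
      rw [hc, ih (j + 1) (j + 1) _ le_rfl hdrop']
      simp only [Nat.sub_self, List.take_zero]
      rw [PySem.List.slice_natCast]
      simp [pvSegRec, h]
    · simp only [List.foldl_cons, h, if_neg, not_false_iff]
      have hc : ((j : Int) + 1) = ((j + 1 : Nat) : Int) := by push_cast; ring
      rw [hc, ih (j + 1) j0 _ (by omega) hdrop']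
      have htake : (ys.drop j0).take (j + 1 - j0) = (ys.drop j0).take (j - j0) ++ [c] := by
        have h1 : j + 1 - j0 = (j - j0) + 1 := by omega
        rw [h1, List.take_add_one]
        have : (ys.drop j0)[j - j0]? = some c := by
          rw [List.getElem?_drop]
          have : j0 + (j - j0) = j := by omega
          rw [this, hget]
        simp [this]
      rw [htake]
      simp [pvSegRec, h]

theorem pvSegSlices_eq (xs : List String) : pvSegSlices xs = pvSegRec xs [] := by
  have := pvB_go xs xs 0 0 [] le_rfl (by simp)
  simpa [pvSegSlices] using this

-- running max (strict >, forward) in terms of the back-to-front first-longest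
theorem pvFoldMax_eq (segs : List (List String)) (c : List String) :
    segs.foldl pvMaxA c
      = if (pvBestR segs).length > c.length then pvBestR segs else c := by
  induction segs generalizing c with
  | nil => simp [pvBestR]
  | cons s t ih =>
    simp only [List.foldl_cons, pvBestR]
    by_cases hs : s.length > c.length
    · rw [show pvMaxA c s = s by simp [pvMaxA, hs]]
      rw [ih s]
      by_cases hb : s.length ≥ (pvBestR t).length
      · simp only [hb, if_pos]
        have : ¬ (pvBestR t).length > s.length := by omega
        simp only [this, if_neg, not_false_iff]
        have : s.length > c.length := hs
        simp [this]
      · have hb' : (pvBestR t).length > s.length := by omega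
        simp only [hb, if_neg, not_false_iff]
        simp only [hb', if_pos]
        have : (pvBestR t).length > c.length := by omega
        simp [this]
    · rw [show pvMaxA c s = c by simp [pvMaxA, hs]]
      rw [ih c]
      by_cases hb : s.length ≥ (pvBestR t).length
      · simp only [hb, if_pos]
        have h1 : ¬ (pvBestR t).length > c.length := by omega
        have h2 : ¬ s.length > c.length := hs
        simp [h1, h2]
      · simp [hb]

theorem pvBestR_of_len_zero (segs : List (List String)) (h : ¬ (pvBestR segs).length > 0) :
    pvBestR segs = [] := by
  cases heq : pvBestR segs with
  | nil => rfl
  | cons a b => rw [heq] at h; simp at h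

-- ===== VERDICT (by name: the statement is the Claim_ definition above) =====
theorem segment_filter_longest_strech_spec : Claim_equal_segment_filter_longest_strech := by
  intro xs _
  show segment_filter_longest_strech xs = segment_filter_longest_strech_alt xs
  unfold segment_filter_longest_strech segment_filter_longest_strech_alt
  rw [pvA_eq, List.foldl_reverse, pvSegSlices_eq]
  have hfoldr : ∀ segs : List (List String),
      segs.foldr (fun seg best => if seg.length ≥ best.length then seg else best) []
        = pvBestR segs := by
    intro segs
    induction segs with
    | nil => rfl
    | cons s t ih => simp [pvBestR, ih]
  rw [hfoldr, pvFoldMax_eq]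
  by_cases h : (pvBestR (pvSegRec xs [])).length > 0
  · simp [h]
  · simp only [List.length_nil, h, if_neg, not_false_iff]
    exact (pvBestR_of_len_zero _ h).symm
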